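-- pv_equiv track=rewrite | github.com/lucasbraide/TrabalhoAlGrafos01 | trabalho01.py | vizinhanca
-- ===== SOURCE A (Python) =====
-- def vizinhanca(v, arestas):
--     viz = []
--     fila = []
--     fila.append(v)
--     while len(fila) != 0:
--         u = fila.pop()
--         for edge in arestas:
--             if u in edge:
--                 for aux in edge:
--                     if aux != u and aux not in viz:
--                         fila.append(aux)
--                         viz.append(aux)
--     viz.sort()
--     return viz
-- ===== SOURCE B (Python) =====
-- def vizinhanca(v, arestas):
--     # Union of all edges in v's connected component, by edge absorption:
--     # each pass merges the edges touching the component into one set and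
--     # drops them from the pool, so every edge is absorbed at most once.
--     nbhd = set()
--     remaining = list(arestas)
--     changed = True
--     while changed:
--         changed = False
--         rest = []
--         for e in remaining:
--             if v in e or not nbhd.isdisjoint(e):
--                 nbhd.update(e)
--                 changed = True
--             else:
--                 rest.append(e)
--         remaining = rest
--     return sorted(nbhd)
-- ===== Notes on version B (the rewrite author's own statement) =====
-- stated objective: alternative
-- what changed: A grows a vertex list with a per-vertex worklist, rescanning the whole edge list for every popped vertex and testing membership by linear list scans; B instead absorbs whole edges: each pass merges every edge touching the component into one set and removes it from the pool, so each edge is processed O(#passes bounded by absorptions) times and membership is O(1)-amortised.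
-- intended difference: On inputs where v occurs in some edge but every edge containing v consists solely of v, A returns [] while B returns [v]; B's is intended because v lies on an edge of its own component, so the sorted vertex set of that component should contain v rather than be empty. — e.g. on vizinhanca(0, [[0]]): A returns [], B returns [0]
import Mathlib
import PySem

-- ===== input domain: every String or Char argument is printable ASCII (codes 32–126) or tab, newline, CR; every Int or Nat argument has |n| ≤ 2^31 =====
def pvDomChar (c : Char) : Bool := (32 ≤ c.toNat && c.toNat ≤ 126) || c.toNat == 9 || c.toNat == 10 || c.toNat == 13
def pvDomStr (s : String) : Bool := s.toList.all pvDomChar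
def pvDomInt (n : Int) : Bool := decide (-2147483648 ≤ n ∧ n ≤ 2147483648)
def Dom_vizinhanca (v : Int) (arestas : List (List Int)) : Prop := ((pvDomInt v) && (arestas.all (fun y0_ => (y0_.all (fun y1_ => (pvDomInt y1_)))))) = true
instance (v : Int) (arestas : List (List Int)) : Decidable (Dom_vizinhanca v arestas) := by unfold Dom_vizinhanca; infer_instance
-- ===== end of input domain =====

-- B replaces A's per-vertex worklist (linear 'not in viz' scans, rescanning every edge per
-- popped vertex) by whole-edge absorption with sets: each pass merges the edges touching the
-- component and removes them from the pool; B intentionally returns [v] (not A's []) when v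
-- only occurs on edges consisting solely of v — see D_vizinhanca.

-- ===== PORT A =====
-- inner 'for aux in edge' loop; state s = (viz, fila)
def vizinhancaAux (u : Int) (s : List Int × List Int) (aux : Int) : List Int × List Int :=
  if aux ≠ u ∧ aux ∉ s.1 then (s.1 ++ [aux], s.2 ++ [aux]) else s

-- 'for edge in arestas: if u in edge: …'
def vizinhancaEdge (u : Int) (st : List Int × List Int) (edge : List Int) : List Int × List Int :=
  if u ∈ edge then edge.foldl (vizinhancaAux u) st else st

-- 'while len(fila) != 0: u = fila.pop(); …' — fuel-bounded recursion; the fuel passed by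
-- `vizinhanca` is provably sufficient (each pop was pushed, pushes ≤ 1 + |flatten|)
def vizinhancaLoop (arestas : List (List Int)) : Nat → List Int → List Int → List Int
  | 0, viz, _ => viz
  | fuel+1, viz, fila =>
    if h : fila = [] then viz
    else
      let st := arestas.foldl (vizinhancaEdge (fila.getLast h)) (viz, fila.dropLast)
      vizinhancaLoop arestas fuel st.1 st.2

def vizinhanca (v : Int) (arestas : List (List Int)) : List Int :=
  PySem.List.sorted (vizinhancaLoop arestas (arestas.flatten.length + 2) [] [v]) (fun x => x) false

-- ===== PORT B =====
-- one edge of a pass; state s = (nbhd, rest, changed)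
def vizinhancaPass (v : Int) (s : PySem.Set Int × List (List Int) × Bool) (e : List Int) :
    PySem.Set Int × List (List Int) × Bool :=
  if decide (v ∈ e) || !(PySem.Set.isdisjoint s.1 e)
  then (PySem.Set.update s.1 e, s.2.1, true)
  else (s.1, s.2.1 ++ [e], s.2.2)

-- 'while changed: changed = False; for e in remaining: …; remaining = rest' — fuel-bounded;
-- the fuel passed by `vizinhanca_alt` is provably sufficient (each changed pass drops ≥ 1 edge)
def vizinhancaLoopB (v : Int) : Nat → PySem.Set Int → List (List Int) → PySem.Set Int
  | 0, nbhd, _ => nbhd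
  | fuel+1, nbhd, remaining =>
    let st := remaining.foldl (vizinhancaPass v) (nbhd, [], false)
    if st.2.2 then vizinhancaLoopB v fuel st.1 st.2.1 else st.1

def vizinhanca_alt (v : Int) (arestas : List (List Int)) : List Int :=
  PySem.List.sorted (vizinhancaLoopB v (arestas.length + 1) PySem.Set.empty arestas) (fun x => x) false

-- ===== PRECONDITION & SPEC =====
-- On inputs where v occurs in some edge but every edge containing v consists solely of v,
-- A returns [] while B returns [v]; B's is intended: v lies on an edge of its own component,
-- so the sorted component-vertex list should contain v rather than be empty.
def D_vizinhanca (v : Int) (arestas : List (List Int)) : Prop :=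
  (∃ e ∈ arestas, v ∈ e) ∧ ∀ e ∈ arestas, v ∈ e → ∀ x ∈ e, x = v
instance (v : Int) (arestas : List (List Int)) : Decidable (D_vizinhanca v arestas) := by
  unfold D_vizinhanca; infer_instance

def Spec_vizinhanca (v : Int) (arestas : List (List Int)) (out : List Int) : Prop :=
  ¬ D_vizinhanca v arestas → out = vizinhanca_alt v arestas
instance (v : Int) (arestas : List (List Int)) (out : List Int) : Decidable (Spec_vizinhanca v arestas out) := by
  unfold Spec_vizinhanca; infer_instance

def pvDiffWitness_vizinhanca : Int × List (List Int) := (0, [[0]])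
def pvDiffWitnessOut_vizinhanca : (List Int) × (List Int) := ([], [0])

-- ===== CLAIM (what is proved, stated in full; the proofs are below) =====
def Claim_unchanged_vizinhanca : Prop := ∀ (v : Int) (arestas : List (List Int)), Dom_vizinhanca v arestas → Spec_vizinhanca v arestas (vizinhanca v arestas)
def Claim_changed_vizinhanca : Prop := Dom_vizinhanca (pvDiffWitness_vizinhanca.1) (pvDiffWitness_vizinhanca.2) ∧ D_vizinhanca (pvDiffWitness_vizinhanca.1) (pvDiffWitness_vizinhanca.2) ∧ vizinhanca (pvDiffWitness_vizinhanca.1) (pvDiffWitness_vizinhanca.2) = pvDiffWitnessOut_vizinhanca.1 ∧ vizinhanca_alt (pvDiffWitness_vizinhanca.1) (pvDiffWitness_vizinhanca.2) = pvDiffWitnessOut_vizinhanca.2 ∧ pvDiffWitnessOut_vizinhanca.1 ≠ pvDiffWitnessOut_vizinhanca.2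
def Claim_exact_vizinhanca : Prop := ∀ (v : Int) (arestas : List (List Int)), Dom_vizinhanca v arestas → D_vizinhanca v arestas → vizinhanca v arestas ≠ vizinhanca_alt v arestas

-- ===== LEMMAS AND PROOFS =====

-- x is connected to v in the hypergraph whose hyperedges are the lists of `arestas`
inductive Rch (v : Int) (arestas : List (List Int)) : Int → Prop
  | base : Rch v arestas v
  | step {e : List Int} {u y : Int} :
      e ∈ arestas → u ∈ e → y ∈ e → y ≠ u → Rch v arestas u → Rch v arestas y

-- v shares some edge with a different vertex
def HasNb (v : Int) (arestas : List (List Int)) : Prop :=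
  ∃ e ∈ arestas, v ∈ e ∧ ∃ x ∈ e, x ≠ v

-- A's pre-sort set
def InT (v : Int) (arestas : List (List Int)) (x : Int) : Prop :=
  Rch v arestas x ∧ (x ≠ v ∨ HasNb v arestas)

-- B's pre-sort set: vertices lying on an edge of v's component
def InB (v : Int) (arestas : List (List Int)) (x : Int) : Prop :=
  ∃ e ∈ arestas, x ∈ e ∧ ∃ u ∈ e, Rch v arestas u

-- a nodup list of members of L is no longer than L
theorem nodup_subset_length {l L : List Int} (hn : l.Nodup) (hs : ∀ x ∈ l, x ∈ L) :
    l.length ≤ L.length := by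
  calc l.length = l.toFinset.card := (List.toFinset_card_of_nodup hn).symm
    _ ≤ L.toFinset.card := Finset.card_le_card (fun x hx => by
        simp only [List.mem_toFinset] at hx ⊢; exact hs x hx)
    _ ≤ L.length := L.toFinset_card_le


-- ---- A side ----

theorem edge_scan (u : Int) (e : List Int) : ∀ (viz fila : List Int), viz.Nodup →
    ∃ Δ : List Int,
      e.foldl (vizinhancaAux u) (viz, fila) = (viz ++ Δ, fila ++ Δ)
      ∧ (viz ++ Δ).Nodup
      ∧ (∀ d ∈ Δ, d ∈ e ∧ d ≠ u)
      ∧ (∀ y ∈ e, y ≠ u → y ∈ viz ++ Δ) := by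
  induction e with
  | nil =>
    intro viz fila hn
    exact ⟨[], by simp, by simpa using hn, by simp, by simp⟩
  | cons a e ih =>
    intro viz fila hn
    by_cases hcond : a ≠ u ∧ a ∉ viz
    · have hstep : vizinhancaAux u (viz, fila) a = (viz ++ [a], fila ++ [a]) := by
        simp [vizinhancaAux, hcond.1, hcond.2]
      have hn' : (viz ++ [a]).Nodup :=
        hn.append (List.nodup_singleton a)
          (fun b hb hb' => hcond.2 ((List.mem_singleton.mp hb') ▸ hb))
      obtain ⟨Δ, hst, hnd, hsound, hcomp⟩ := ih (viz ++ [a]) (fila ++ [a]) hn'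
      refine ⟨a :: Δ, ?_, ?_, ?_, ?_⟩
      · rw [List.foldl_cons, hstep, hst]; simp
      · simpa using hnd
      · intro d hd
        rcases List.mem_cons.mp hd with rfl | hd'
        · exact ⟨List.mem_cons_self, hcond.1⟩
        · exact ⟨List.mem_cons_of_mem _ (hsound d hd').1, (hsound d hd').2⟩
      · intro y hy hyu
        rcases List.mem_cons.mp hy with rfl | hy'
        · simp
        · have := hcomp y hy' hyu; simpa using this
    · have hstep : vizinhancaAux u (viz, fila) a = (viz, fila) := by
        simp only [vizinhancaAux, if_neg hcond]
      obtain ⟨Δ, hst, hnd, hsound, hcomp⟩ := ih viz fila hn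
      refine ⟨Δ, by rw [List.foldl_cons, hstep]; exact hst, hnd, ?_, ?_⟩
      · exact fun d hd => ⟨List.mem_cons_of_mem _ (hsound d hd).1, (hsound d hd).2⟩
      · intro y hy hyu
        rcases List.mem_cons.mp hy with rfl | hy'
        · push_neg at hcond
          exact List.mem_append_left _ (hcond hyu)
        · exact hcomp y hy' hyu


theorem edges_scan (u : Int) : ∀ (es : List (List Int)) (viz fila : List Int), viz.Nodup →
    ∃ Δ : List Int,
      es.foldl (vizinhancaEdge u) (viz, fila) = (viz ++ Δ, fila ++ Δ)
      ∧ (viz ++ Δ).Nodup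
      ∧ (∀ d ∈ Δ, ∃ e ∈ es, u ∈ e ∧ d ∈ e ∧ d ≠ u)
      ∧ (∀ e ∈ es, u ∈ e → ∀ y ∈ e, y ≠ u → y ∈ viz ++ Δ) := by
  intro es
  induction es with
  | nil =>
    intro viz fila hn
    exact ⟨[], by simp, by simpa using hn, by simp, by simp⟩
  | cons e es ih =>
    intro viz fila hn
    by_cases hue : u ∈ e
    · have hstep : vizinhancaEdge u (viz, fila) e = e.foldl (vizinhancaAux u) (viz, fila) := by
        simp only [vizinhancaEdge, if_pos hue]
      obtain ⟨Δ₁, hst₁, hnd₁, hsound₁, hcomp₁⟩ := edge_scan u e viz fila hn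
      obtain ⟨Δ₂, hst₂, hnd₂, hsound₂, hcomp₂⟩ := ih (viz ++ Δ₁) (fila ++ Δ₁) hnd₁
      refine ⟨Δ₁ ++ Δ₂, ?_, ?_, ?_, ?_⟩
      · rw [List.foldl_cons, hstep, hst₁, hst₂]; simp
      · simpa [List.append_assoc] using hnd₂
      · intro d hd
        rcases List.mem_append.mp hd with hd' | hd'
        · exact ⟨e, List.mem_cons_self, hue, (hsound₁ d hd').1, (hsound₁ d hd').2⟩
        · obtain ⟨e', he', h1, h2, h3⟩ := hsound₂ d hd'
          exact ⟨e', List.mem_cons_of_mem _ he', h1, h2, h3⟩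
      · intro e' he' hue' y hy hyu
        rcases List.mem_cons.mp he' with rfl | he''
        · have := hcomp₁ y hy hyu
          rcases List.mem_append.mp this with h1 | h1
          · exact List.mem_append_left _ h1
          · exact List.mem_append_right _ (List.mem_append_left _ h1)
        · have := hcomp₂ e' he'' hue' y hy hyu
          simpa [List.append_assoc] using this
    · have hstep : vizinhancaEdge u (viz, fila) e = (viz, fila) := by
        simp only [vizinhancaEdge, if_neg hue]
      obtain ⟨Δ, hst, hnd, hsound, hcomp⟩ := ih viz fila hn
      refine ⟨Δ, by rw [List.foldl_cons, hstep]; exact hst, hnd, ?_, ?_⟩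
      · intro d hd
        obtain ⟨e', he', h1, h2, h3⟩ := hsound d hd
        exact ⟨e', List.mem_cons_of_mem _ he', h1, h2, h3⟩
      · intro e' he' hue' y hy hyu
        rcases List.mem_cons.mp he' with rfl | he''
        · exact absurd hue' hue
        · exact hcomp e' he'' hue' y hy hyu


def InvA (v : Int) (arestas : List (List Int)) (viz fila : List Int) : Prop :=
  viz.Nodup ∧
  (∀ x ∈ viz, InT v arestas x) ∧
  (∀ x ∈ fila, x = v ∨ x ∈ viz) ∧
  (∀ x ∈ viz, x ∈ arestas.flatten) ∧
  (∀ u, (u = v ∨ u ∈ viz) → u ∉ fila → ∀ e ∈ arestas, u ∈ e → ∀ y ∈ e, y ≠ u → y ∈ viz)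

theorem loopA_inv (v : Int) (arestas : List (List Int)) :
    ∀ (fuel : Nat) (viz fila : List Int), InvA v arestas viz fila →
    fila.length + arestas.flatten.length ≤ fuel + viz.length →
    InvA v arestas (vizinhancaLoop arestas fuel viz fila) [] := by
  intro fuel
  induction fuel with
  | zero =>
    intro viz fila hInv hlen
    obtain ⟨hnd, hsnd, hfila, hflat, hset⟩ := hInv
    have hviz : viz.length ≤ arestas.flatten.length := nodup_subset_length hnd hflat
    have : fila = [] := List.length_eq_zero_iff.mp (by omega)
    subst this
    exact ⟨hnd, hsnd, hfila, hflat, hset⟩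
  | succ fuel ih =>
    intro viz fila hInv hlen
    obtain ⟨hnd, hsnd, hfila, hflat, hset⟩ := hInv
    by_cases h : fila = []
    · subst h
      simp only [vizinhancaLoop, dif_pos]
      exact ⟨hnd, hsnd, hfila, hflat, hset⟩
    · simp only [vizinhancaLoop, dif_neg h]
      set u := fila.getLast h with hu_def
      obtain ⟨Δ, hst, hndΔ, hsound, hcomp⟩ := edges_scan u arestas viz fila.dropLast hnd
      rw [hst]
      have hfila_eq : fila.dropLast ++ [u] = fila := List.dropLast_concat_getLast h
      have hu_mem : u ∈ fila := List.getLast_mem h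
      have hu_cases : u = v ∨ u ∈ viz := hfila u hu_mem
      have hRch_u : Rch v arestas u := by
        rcases hu_cases with rfl | hv
        · exact Rch.base
        · exact (hsnd u hv).1
      apply ih
      · refine ⟨hndΔ, ?_, ?_, ?_, ?_⟩
        · intro x hx
          rcases List.mem_append.mp hx with hx' | hx'
          · exact hsnd x hx'
          · obtain ⟨e, he, hue, hxe, hxu⟩ := hsound x hx'
            refine ⟨Rch.step he hue hxe hxu hRch_u, ?_⟩
            by_cases hxv : x = v
            · subst hxv
              exact Or.inr ⟨e, he, hxe, u, hue, fun h => hxu h.symm⟩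
            · exact Or.inl hxv
        · intro x hx
          rcases List.mem_append.mp hx with hx' | hx'
          · rcases hfila x ((List.dropLast_sublist fila).subset hx') with rfl | hv
            · exact Or.inl rfl
            · exact Or.inr (List.mem_append_left _ hv)
          · exact Or.inr (List.mem_append_right _ hx')
        · intro x hx
          rcases List.mem_append.mp hx with hx' | hx'
          · exact hflat x hx'
          · obtain ⟨e, he, _, hxe, _⟩ := hsound x hx'
            exact List.mem_flatten.mpr ⟨e, he, hxe⟩
        · intro w hw hwnot e' he' hwe' y hy hyw
          have hwΔ : w ∉ Δ := fun hΔ => hwnot (List.mem_append_right _ hΔ)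
          have hw0 : w ∉ fila.dropLast := fun hf => hwnot (List.mem_append_left _ hf)
          have hw' : w = v ∨ w ∈ viz := by
            rcases hw with rfl | hw
            · exact Or.inl rfl
            · rcases List.mem_append.mp hw with h1 | h1
              · exact Or.inr h1
              · exact absurd h1 hwΔ
          by_cases hwu : w = u
          · subst hwu
            exact hcomp e' he' hwe' y hy hyw
          · have hwfila : w ∉ fila := by
              rw [← hfila_eq]
              intro hmem
              rcases List.mem_append.mp hmem with h1 | h1
              · exact hw0 h1
              · exact hwu (List.mem_singleton.mp h1)
            exact List.mem_append_left _ (hset w hw' hwfila e' he' hwe' y hy hyw)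
      · have hlen0 : fila.dropLast.length + 1 = fila.length := by
          rw [List.length_dropLast]
          have : 0 < fila.length := List.length_pos_iff.mpr h
          omega
        simp only [List.length_append]
        omega


theorem finalA (v : Int) (arestas : List (List Int)) (R : List Int) (h : InvA v arestas R []) :
    ∀ x, x ∈ R ↔ InT v arestas x := by
  obtain ⟨hnd, hsnd, _, _, hset⟩ := h
  have hRchAll : ∀ x, Rch v arestas x → x = v ∨ x ∈ R := by
    intro x hx
    induction hx with
    | base => exact Or.inl rfl
    | step he hu hy hyu hru ihu =>
      exact Or.inr (hset _ ihu (List.not_mem_nil) _ he hu _ hy hyu)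
  intro x
  constructor
  · exact fun hx => hsnd x hx
  · rintro ⟨hRch, hdisj⟩
    rcases hRchAll x hRch with rfl | hxR
    · rcases hdisj with hne | ⟨e, he, hve, z, hze, hzv⟩
      · exact absurd rfl hne
      · have hRz : Rch x arestas z := Rch.step he hve hze hzv Rch.base
        have hzR : z ∈ R := by
          rcases hRchAll z hRz with rfl | hz
          · exact absurd rfl hzv
          · exact hz
        exact hset z (Or.inr hzR) (List.not_mem_nil) e he hze x hve (Ne.symm hzv)
    · exact hxR


theorem A_char (v : Int) (arestas : List (List Int)) :
    (vizinhancaLoop arestas (arestas.flatten.length + 2) [] [v]).Nodup ∧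
    ∀ x, x ∈ vizinhancaLoop arestas (arestas.flatten.length + 2) [] [v] ↔ InT v arestas x := by
  have hInv : InvA v arestas [] [v] := by
    refine ⟨List.nodup_nil, by simp, ?_, by simp, ?_⟩
    · intro x hx
      exact Or.inl (List.mem_singleton.mp hx)
    · intro u hu hnot
      rcases hu with rfl | hu
      · exact absurd (List.mem_singleton.mpr rfl) hnot
      · exact absurd hu (List.not_mem_nil)
  have hfin := loopA_inv v arestas (arestas.flatten.length + 2) [] [v] hInv (by simp; omega)
  exact ⟨hfin.1, finalA v arestas _ hfin⟩


-- ---- B side ----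

-- one pass ('for e in remaining'): the absorbed new vertices Δ and the kept edges
theorem passB (v : Int) (arestas : List (List Int)) :
    ∀ (es : List (List Int)) (r : PySem.Set Int) (rest0 : List (List Int)) (ch : Bool),
    r.Nodup →
    ∃ Δ : List Int, ∃ kept : List (List Int), ∃ b : Bool,
      es.foldl (vizinhancaPass v) (r, rest0, ch) = (r ++ Δ, rest0 ++ kept, b)
      ∧ (r ++ Δ).Nodup
      ∧ (∀ e ∈ kept, e ∈ es)
      ∧ kept.length ≤ es.length
      ∧ (∀ x ∈ Δ, ∃ e ∈ es, x ∈ e)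
      ∧ (∀ e ∈ es, (∀ x ∈ e, x ∈ r ++ Δ) ∨ e ∈ kept)
      ∧ ((∀ x ∈ r, Rch v arestas x) → (∀ e ∈ es, e ∈ arestas) → ∀ x ∈ Δ, Rch v arestas x)
      ∧ (b = true → ch = true ∨ kept.length < es.length)
      ∧ (b = false → ch = false ∧ Δ = [] ∧ kept = es ∧ ∀ e ∈ es, v ∉ e ∧ ∀ x ∈ e, x ∉ r) := by
  intro es
  induction es with
  | nil =>
    intro r rest0 ch hn
    exact ⟨[], [], ch, by simp, by simpa using hn, by simp, by simp, by simp, by simp,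
      by simp, fun hb => Or.inl hb, fun hb => ⟨hb, rfl, rfl, by simp⟩⟩
  | cons e es ih =>
    intro r rest0 ch hn
    by_cases g : (decide (v ∈ e) || !(PySem.Set.isdisjoint r e)) = true
    · have hstep : vizinhancaPass v (r, rest0, ch) e = (PySem.Set.update r e, rest0, true) := by
        simp only [vizinhancaPass, if_pos g]
      have hupd : PySem.Set.update r e
          = r ++ (PySem.Set.ofList e).filter (fun y => !(PySem.Set.contains r y)) :=
        PySem.Set.update_eq_append_filter r e
      set Δ₀ := (PySem.Set.ofList e).filter (fun y => !(PySem.Set.contains r y)) with hΔ₀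
      have hΔ₀mem : ∀ d ∈ Δ₀, d ∈ e ∧ d ∉ r := by
        intro d hd
        rw [hΔ₀, List.mem_filter] at hd
        refine ⟨(PySem.Set.mem_ofList _ _).mp hd.1, ?_⟩
        intro hdr
        have := hd.2
        simp at this
        exact this hdr
      have hnd₀ : (r ++ Δ₀).Nodup := by
        rw [← hupd]; exact PySem.Set.nodup_update r e hn
      have hΔ₀Rch : (∀ x ∈ r, Rch v arestas x) → e ∈ arestas → ∀ d ∈ Δ₀, Rch v arestas d := by
        intro hr he d hd
        obtain ⟨hde, hdr⟩ := hΔ₀mem d hd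
        by_cases hv : v ∈ e
        · by_cases hdv : d = v
          · exact hdv ▸ Rch.base
          · exact Rch.step he hv hde hdv Rch.base
        · have hdisj : PySem.Set.isdisjoint r e = false := by
            rcases Bool.or_eq_true_iff.mp g with h1 | h1
            · exact absurd (of_decide_eq_true h1) hv
            · simpa using h1
          have hmeet : ∃ w ∈ r, w ∈ e := by
            by_contra hno
            push_neg at hno
            rw [(PySem.Set.isdisjoint_iff r e).mpr (fun x hx => hno x hx)] at hdisj
            exact Bool.true_eq_false.mp hdisj
          obtain ⟨w, hwr, hwe⟩ := hmeet
          have hdw : d ≠ w := fun h => hdr (h ▸ hwr)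
          exact Rch.step he hwe hde hdw (hr w hwr)
      obtain ⟨Δ', kept, b, hst, hnd', hkes, hklen, hmem, hcl, hso, hbt, hbf⟩ :=
        ih (r ++ Δ₀) rest0 true hnd₀
      have hfold : (e :: es).foldl (vizinhancaPass v) (r, rest0, ch)
          = es.foldl (vizinhancaPass v) (r ++ Δ₀, rest0, true) := by
        rw [List.foldl_cons, hstep, hupd]
      have hbtrue : b = true := by
        cases b with
        | false => exact absurd (hbf rfl).1 (by simp)
        | true => rfl
      refine ⟨Δ₀ ++ Δ', kept, b, ?_, ?_, ?_, ?_, ?_, ?_, ?_, ?_, ?_⟩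
      · rw [hfold, hst, List.append_assoc]
      · simpa [List.append_assoc] using hnd'
      · exact fun e' he' => List.mem_cons_of_mem _ (hkes e' he')
      · simp only [List.length_cons]; omega
      · intro x hx
        rcases List.mem_append.mp hx with hx' | hx'
        · exact ⟨e, List.mem_cons_self, (hΔ₀mem x hx').1⟩
        · obtain ⟨e', he', hxe'⟩ := hmem x hx'
          exact ⟨e', List.mem_cons_of_mem _ he', hxe'⟩
      · intro e' he'
        rcases List.mem_cons.mp he' with rfl | he''
        · left
          intro x hx
          have : x ∈ r ++ Δ₀ := by
            rw [← hupd]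
            have := (PySem.Set.mem_update (s := r) (xs := e') (y := x)).mpr (Or.inr hx)
            exact this
          rcases List.mem_append.mp this with h1 | h1
          · exact List.mem_append_left _ h1
          · exact List.mem_append_right _ (List.mem_append_left _ h1)
        · rcases hcl e' he'' with h1 | h1
          · left
            intro x hx
            have := h1 x hx
            simpa [List.append_assoc] using this
          · exact Or.inr h1
      · intro hr hes x hx
        have hr' : ∀ x ∈ r ++ Δ₀, Rch v arestas x := by
          intro y hy
          rcases List.mem_append.mp hy with hy' | hy'
          · exact hr y hy'
          · exact hΔ₀Rch hr (hes e List.mem_cons_self) y hy'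
        rcases List.mem_append.mp hx with hx' | hx'
        · exact hΔ₀Rch hr (hes e List.mem_cons_self) x hx'
        · exact hso hr' (fun e' he' => hes e' (List.mem_cons_of_mem _ he')) x hx'
      · intro _
        right
        simp only [List.length_cons]
        omega
      · intro hb
        exact absurd (hbtrue ▸ hb) (by simp)
    · have hstep : vizinhancaPass v (r, rest0, ch) e = (r, rest0 ++ [e], ch) := by
        simp only [vizinhancaPass, if_neg g]
      obtain ⟨Δ, kept, b, hst, hnd', hkes, hklen, hmem, hcl, hso, hbt, hbf⟩ :=
        ih r (rest0 ++ [e]) ch hn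
      have hfold : (e :: es).foldl (vizinhancaPass v) (r, rest0, ch)
          = es.foldl (vizinhancaPass v) (r, rest0 ++ [e], ch) := by
        rw [List.foldl_cons, hstep]
      have hg : v ∉ e ∧ PySem.Set.isdisjoint r e = true := by
        rcases Bool.or_eq_false_iff.mp (Bool.eq_false_iff.mpr g) with ⟨h1, h2⟩
        exact ⟨of_decide_eq_false h1, by simpa using h2⟩
      refine ⟨Δ, e :: kept, b, ?_, hnd', ?_, ?_, ?_, ?_,
        (fun hr hes => hso hr (fun e' he' => hes e' (List.mem_cons_of_mem _ he'))), ?_, ?_⟩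
      · rw [hfold, hst, List.append_assoc]; rfl
      · intro e' he'
        rcases List.mem_cons.mp he' with rfl | he''
        · exact List.mem_cons_self
        · exact List.mem_cons_of_mem _ (hkes e' he'')
      · simp only [List.length_cons]; omega
      · intro x hx
        obtain ⟨e', he', hxe'⟩ := hmem x hx
        exact ⟨e', List.mem_cons_of_mem _ he', hxe'⟩
      · intro e' he'
        rcases List.mem_cons.mp he' with rfl | he''
        · exact Or.inr List.mem_cons_self
        · rcases hcl e' he'' with h1 | h1
          · exact Or.inl h1
          · exact Or.inr (List.mem_cons_of_mem _ h1)
      · intro hb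
        rcases hbt hb with h1 | h1
        · exact Or.inl h1
        · right; simp only [List.length_cons]; omega
      · intro hb
        obtain ⟨h1, h2, h3, h4⟩ := hbf hb
        refine ⟨h1, h2, by rw [h3], ?_⟩
        intro e' he'
        rcases List.mem_cons.mp he' with rfl | he''
        · exact ⟨hg.1, fun x hx hxr => (PySem.Set.isdisjoint_iff r e').mp hg.2 x hxr hx⟩
        · exact h4 e' he''


theorem loopB_inv (v : Int) (arestas : List (List Int)) :
    ∀ (fuel : Nat) (r : PySem.Set Int) (rem : List (List Int)),
    r.Nodup →
    (∀ e ∈ rem, e ∈ arestas) →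
    (∀ x ∈ r, Rch v arestas x) →
    (∀ x ∈ r, x ∈ arestas.flatten) →
    (∀ e ∈ arestas, (∀ x ∈ e, x ∈ r) ∨ e ∈ rem) →
    rem.length + 1 ≤ fuel →
    (vizinhancaLoopB v fuel r rem).Nodup
    ∧ (∀ x ∈ r, x ∈ vizinhancaLoopB v fuel r rem)
    ∧ (∀ x ∈ vizinhancaLoopB v fuel r rem, Rch v arestas x)
    ∧ (∀ x ∈ vizinhancaLoopB v fuel r rem, x ∈ arestas.flatten)
    ∧ (∀ e ∈ arestas, (∀ x ∈ e, x ∈ vizinhancaLoopB v fuel r rem)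
         ∨ (v ∉ e ∧ ∀ x ∈ e, x ∉ vizinhancaLoopB v fuel r rem)) := by
  intro fuel
  induction fuel with
  | zero =>
    intro r rem hn hsub hr hfl hcl hlen
    omega
  | succ fuel ih =>
    intro r rem hn hsub hr hfl hcl hlen
    obtain ⟨Δ, kept, b, hst, hnd, hkes, hklen, hmem, hclp, hso, hbt, hbf⟩ :=
      passB v arestas rem r [] false hn
    simp only [List.nil_append] at hst
    cases b with
    | false =>
      obtain ⟨_, hΔnil, hkeq, hquiet⟩ := hbf rfl
      have hres : vizinhancaLoopB v (fuel + 1) r rem = r := by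
        simp only [vizinhancaLoopB, hst]
        subst hΔnil
        simp
      rw [hres]
      refine ⟨hn, fun x hx => hx, hr, hfl, ?_⟩
      intro e he
      rcases hcl e he with h1 | h1
      · exact Or.inl h1
      · right
        refine ⟨(hquiet e h1).1, (hquiet e h1).2⟩
    | true =>
      have hres : vizinhancaLoopB v (fuel + 1) r rem = vizinhancaLoopB v fuel (r ++ Δ) kept := by
        simp only [vizinhancaLoopB, hst]
        simp
      rw [hres]
      have hshorter : kept.length < rem.length := by
        rcases hbt rfl with h1 | h1
        · exact absurd h1 (by simp)
        · exact h1
      have hΔRch : ∀ x ∈ Δ, Rch v arestas x := hso hr hsub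
      obtain ⟨hN, hMono, hSo, hFl, hCl⟩ := ih (r ++ Δ) kept hnd
        (fun e he => hsub e (hkes e he))
        (by
          intro x hx
          rcases List.mem_append.mp hx with hx' | hx'
          · exact hr x hx'
          · exact hΔRch x hx')
        (by
          intro x hx
          rcases List.mem_append.mp hx with hx' | hx'
          · exact hfl x hx'
          · obtain ⟨e, he, hxe⟩ := hmem x hx'
            exact List.mem_flatten.mpr ⟨e, hsub e he, hxe⟩)
        (by
          intro e he
          rcases hcl e he with h1 | h1
          · exact Or.inl (fun x hx => List.mem_append_left _ (h1 x hx))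
          · exact hclp e h1)
        (by omega)
      exact ⟨hN, fun x hx => hMono x (List.mem_append_left _ hx), hSo, hFl, hCl⟩


theorem B_char (v : Int) (arestas : List (List Int)) :
    (vizinhancaLoopB v (arestas.length + 1) PySem.Set.empty arestas).Nodup ∧
    ∀ x, x ∈ vizinhancaLoopB v (arestas.length + 1) PySem.Set.empty arestas ↔ InB v arestas x := by
  have hemp : (PySem.Set.empty : PySem.Set Int) = [] := rfl
  obtain ⟨hN, _, hSo, hFl, hCl⟩ :=
    loopB_inv v arestas (arestas.length + 1) PySem.Set.empty arestas
      (by rw [hemp]; exact List.nodup_nil)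
      (fun e he => he)
      (by rw [hemp]; intro x hx; exact absurd hx (List.not_mem_nil))
      (by rw [hemp]; intro x hx; exact absurd hx (List.not_mem_nil))
      (fun e he => Or.inr he)
      (by omega)
  set R := vizinhancaLoopB v (arestas.length + 1) PySem.Set.empty arestas with hR
  have hall : ∀ y, Rch v arestas y → y = v ∨ y ∈ R := by
    intro y hy
    induction hy with
    | base => exact Or.inl rfl
    | step he' hu' hy' hyu' hru ih =>
      right
      rcases ih with rfl | hw
      · rcases hCl _ he' with h1 | h1
        · exact h1 _ hy'
        · exact absurd hu' h1.1
      · rcases hCl _ he' with h1 | h1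
        · exact h1 _ hy'
        · exact absurd hw (h1.2 _ hu')
  refine ⟨hN, fun x => ⟨?_, ?_⟩⟩
  · intro hx
    have hRch := hSo x hx
    obtain ⟨e, he, hxe⟩ := List.mem_flatten.mp (hFl x hx)
    exact ⟨e, he, hxe, x, hxe, hRch⟩
  · rintro ⟨e, he, hxe, u, hue, hru⟩
    rcases hCl e he with h1 | h1
    · exact h1 x hxe
    · exfalso
      rcases hall u hru with rfl | hu
      · exact h1.1 hue
      · exact h1.2 u hue hu

-- membership form of B's set
theorem InB_iff (v : Int) (arestas : List (List Int)) (x : Int) :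
    InB v arestas x ↔ Rch v arestas x ∧ (x ≠ v ∨ ∃ e ∈ arestas, v ∈ e) := by
  constructor
  · rintro ⟨e, he, hxe, u, hue, hru⟩
    constructor
    · by_cases hxu : x = u
      · exact hxu ▸ hru
      · exact Rch.step he hue hxe hxu hru
    · by_cases hxv : x = v
      · exact Or.inr ⟨e, he, hxv ▸ hxe⟩
      · exact Or.inl hxv
  · rintro ⟨hr, hd⟩
    by_cases hxv : x = v
    · subst hxv
      rcases hd with hne | ⟨e, he, hve⟩
      · exact absurd rfl hne
      · exact ⟨e, he, hve, x, hve, Rch.base⟩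
    · cases hr with
      | base => exact absurd rfl hxv
      | step he hu hy hyu hru => exact ⟨_, he, hy, _, hu, hru⟩

theorem rch_fixed_of_not_hasNb (v : Int) (arestas : List (List Int))
    (h : ¬ HasNb v arestas) : ∀ x, Rch v arestas x → x = v := by
  intro x hx
  induction hx with
  | base => rfl
  | step he hu hy hyu hru ih =>
    subst ih
    exact absurd ⟨_, he, hu, _, hy, fun hz => hyu hz⟩ h

-- A = B off D_
theorem main_eq (v : Int) (arestas : List (List Int)) (hnD : ¬ D_vizinhanca v arestas) :
    vizinhanca v arestas = vizinhanca_alt v arestas := by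
  unfold vizinhanca vizinhanca_alt
  obtain ⟨hAnd, hAmem⟩ := A_char v arestas
  obtain ⟨hBnd, hBmem⟩ := B_char v arestas
  have hdisj : ∀ x : Int, (x ≠ v ∨ HasNb v arestas) ↔ (x ≠ v ∨ ∃ e ∈ arestas, v ∈ e) := by
    intro x
    constructor
    · rintro (h | ⟨e, he, hve, _⟩)
      · exact Or.inl h
      · exact Or.inr ⟨e, he, hve⟩
    · rintro (h | ⟨e, he, hve⟩)
      · exact Or.inl h
      · unfold D_vizinhanca at hnD
        push_neg at hnD
        rcases hnD ⟨e, he, hve⟩ with ⟨e', he', hve', x', hx', hx'v⟩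
        exact Or.inr ⟨e', he', hve', x', hx', hx'v⟩
  have hmem : ∀ x, x ∈ vizinhancaLoop arestas (arestas.flatten.length + 2) [] [v]
      ↔ x ∈ vizinhancaLoopB v (arestas.length + 1) PySem.Set.empty arestas := by
    intro x
    rw [hAmem x, hBmem x, InB_iff]
    unfold InT
    rw [hdisj x]
  have hperm : (vizinhancaLoop arestas (arestas.flatten.length + 2) [] [v]).Perm
      (vizinhancaLoopB v (arestas.length + 1) PySem.Set.empty arestas) :=
    (List.perm_ext_iff_of_nodup hAnd hBnd).mpr hmem
  exact PySem.List.sorted_eq_sorted_of_perm _ _ (fun x => x) (fun a b h => h) hperm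

-- ===== VERDICT (by name: the statements are the Claim_ definitions above) =====
theorem vizinhanca_spec : Claim_unchanged_vizinhanca := by
  intro v arestas _
  unfold Spec_vizinhanca
  intro hnD
  exact main_eq v arestas hnD

theorem vizinhanca_changed : Claim_changed_vizinhanca := by
  unfold Claim_changed_vizinhanca; decide

theorem vizinhanca_tight : Claim_exact_vizinhanca := by
  intro v arestas _ hD
  obtain ⟨⟨e0, he0, hv0⟩, hall⟩ := hD
  have hnb : ¬ HasNb v arestas := by
    rintro ⟨e, he, hve, x, hxe, hxv⟩
    exact hxv (hall e he hve x hxe)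
  have hfix := rch_fixed_of_not_hasNb v arestas hnb
  obtain ⟨hAnd, hAmem⟩ := A_char v arestas
  obtain ⟨hBnd, hBmem⟩ := B_char v arestas
  have hAnil : vizinhancaLoop arestas (arestas.flatten.length + 2) [] [v] = [] := by
    rw [List.eq_nil_iff_forall_not_mem]
    intro x hx
    obtain ⟨hr, hd⟩ := (hAmem x).mp hx
    rcases hd with hne | hHas
    · exact hne (hfix x hr)
    · exact hnb hHas
  have hBv : ∀ x, x ∈ vizinhancaLoopB v (arestas.length + 1) PySem.Set.empty arestas ↔ x ∈ [v] := by
    intro x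
    rw [hBmem x, InB_iff, List.mem_singleton]
    constructor
    · rintro ⟨hr, _⟩
      exact hfix x hr
    · rintro rfl
      exact ⟨Rch.base, Or.inr ⟨e0, he0, hv0⟩⟩
  have hBperm : ([v] : List Int).Perm (vizinhancaLoopB v (arestas.length + 1) PySem.Set.empty arestas) :=
    (List.perm_ext_iff_of_nodup (List.nodup_singleton v) hBnd).mpr (fun x => (hBv x).symm)
  have hBval : vizinhanca_alt v arestas = [v] := by
    unfold vizinhanca_alt
    exact PySem.List.sorted_eq_of_perm_of_pairwise_lt _ [v] (fun x => x) hBperm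
      (List.pairwise_singleton _ _)
  have hAval : vizinhanca v arestas = [] := by
    unfold vizinhanca
    rw [hAnil]
    rfl
  rw [hAval, hBval]
  simp
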